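-- pv_equiv track=rewrite | github.com/RCW9/Python-Katas | src/get_distinct_letters/get_distinct_letters.py | get_distinct_letters
-- ===== SOURCE A (Python) =====
-- def get_distinct_letters(str1, str2):
-- 	new_string = ""
-- 	for letter in str1:
-- 		if letter not in str2:
-- 			new_string+= letter
-- 	for letter in str2:
-- 		if letter not in str1 and letter not in new_string:
-- 			new_string+= letter
-- 	return ''.join(sorted(new_string))
-- ===== SOURCE B (Python) =====
-- def get_distinct_letters(str1, str2):
--     s1 = set(str1)
--     s2 = set(str2)
--     out = []
--     for ch in sorted(s1 ^ s2):
--         if ch in s1: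
--             out.append(ch * str1.count(ch))
--         else:
--             out.append(ch)
--     return ''.join(out)
-- ===== Notes on version B (the rewrite author's own statement) =====
-- stated objective: faster
-- what changed: B replaces A's two position scans with per-character membership tests plus a final sort by one pass over the sorted symmetric difference of the two character sets, expanding each str1-only character by its count in str1 and emitting each str2-only character once.
import Mathlib
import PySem

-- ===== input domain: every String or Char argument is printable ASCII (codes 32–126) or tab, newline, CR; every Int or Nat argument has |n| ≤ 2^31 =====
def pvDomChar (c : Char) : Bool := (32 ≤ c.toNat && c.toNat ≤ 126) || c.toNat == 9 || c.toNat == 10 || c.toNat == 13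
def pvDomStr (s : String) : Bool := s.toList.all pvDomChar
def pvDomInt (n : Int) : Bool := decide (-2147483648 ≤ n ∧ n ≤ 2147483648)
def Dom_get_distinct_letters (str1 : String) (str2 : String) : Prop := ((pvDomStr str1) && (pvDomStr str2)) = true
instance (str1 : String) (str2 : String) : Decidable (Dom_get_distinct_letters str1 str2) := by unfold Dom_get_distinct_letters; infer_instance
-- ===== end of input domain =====

-- B rebuilds the answer in one pass over the sorted symmetric difference of the two character
-- sets (expanding str1-only characters by their count in str1), instead of A's two quadratic
-- membership scans followed by a sort; objective: faster.


-- ===== PORT A =====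
-- 'letter in str2' on a single character is exactly character membership in str2's characters.
def get_distinct_letters (str1 : String) (str2 : String) : String :=
  let new1 : List Char :=
    str1.toList.foldl (fun acc letter => if letter ∉ str2.toList then acc ++ [letter] else acc) []
  let new2 : List Char :=
    str2.toList.foldl
      (fun acc letter => if letter ∉ str1.toList ∧ letter ∉ acc then acc ++ [letter] else acc) new1
  String.mk (PySem.List.sorted new2 (fun c => c) false)

-- ===== PORT B =====
-- sorted(s1 ^ s2) iterated in sorted order; 'ch * str1.count(ch)' on a single character is
-- exactly List.replicate of its character count in str1.
def get_distinct_letters_alt (str1 : String) (str2 : String) : String :=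
  let s1 : PySem.Set Char := PySem.Set.ofList str1.toList
  let s2 : PySem.Set Char := PySem.Set.ofList str2.toList
  let out : List Char :=
    (PySem.List.sorted (PySem.Set.symmDiff s1 s2) (fun c => c) false).foldl
      (fun acc ch =>
        if ch ∈ s1 then acc ++ List.replicate (str1.toList.count ch) ch else acc ++ [ch]) []
  String.mk out

-- ===== PRECONDITION & SPEC =====
def Spec_get_distinct_letters (str1 : String) (str2 : String) (out : String) : Prop := out = get_distinct_letters_alt str1 str2
instance (str1 : String) (str2 : String) (out : String) : Decidable (Spec_get_distinct_letters str1 str2 out) := by unfold Spec_get_distinct_letters; infer_instance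

-- ===== CLAIM (what is proved, stated in full; the proofs are below) =====
def Claim_equal_get_distinct_letters : Prop := ∀ (str1 : String) (str2 : String), Dom_get_distinct_letters str1 str2 → Spec_get_distinct_letters str1 str2 (get_distinct_letters str1 str2)

-- ===== LEMMAS AND PROOFS =====

-- The expansion block B emits for one distinct character ch.
def pvBlock (l1 : List Char) (ch : Char) : List Char :=
  if ch ∈ l1 then List.replicate (l1.count ch) ch else [ch]

-- Every element of a block is its character.
theorem pvBlock_mem (l1 : List Char) (ch x : Char) (hx : x ∈ pvBlock l1 ch) : x = ch := by
  unfold pvBlock at hx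
  split at hx
  · exact List.eq_of_mem_replicate hx
  · simpa using hx

-- Count inside one block.
theorem pvBlock_count (l1 : List Char) (ch c : Char) :
    (pvBlock l1 ch).count c
      = if c = ch then (if ch ∈ l1 then l1.count ch else 1) else 0 := by
  by_cases hc : c = ch
  · subst hc
    unfold pvBlock
    by_cases h1 : c ∈ l1 <;> simp [h1]
  · have h0 : c ∉ pvBlock l1 ch := fun hm => hc (pvBlock_mem l1 ch c hm)
    rw [List.count_eq_zero.mpr h0, if_neg hc]

-- Count of the concatenation of blocks over a duplicate-free list.
theorem pvFlat_count (l1 : List Char) (L : List Char) (hL : L.Nodup) (c : Char) :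
    (L.flatMap (pvBlock l1)).count c
      = if c ∈ L then (if c ∈ l1 then l1.count c else 1) else 0 := by
  induction L with
  | nil => simp
  | cons a t ih =>
    have hnd := hL
    rw [List.nodup_cons] at hnd
    rw [List.flatMap_cons, List.count_append, ih hnd.2, pvBlock_count]
    by_cases hc : c = a
    · subst hc
      simp [hnd.1]
    · simp [hc, List.mem_cons]

-- The blocks over a strictly increasing list are sorted (≤).
theorem pvFlat_pairwise (l1 : List Char) (L : List Char)
    (hL : L.Pairwise (· < ·)) :
    (L.flatMap (pvBlock l1)).Pairwise (· ≤ ·) := by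
  induction L with
  | nil => simp
  | cons a t ih =>
    rw [List.pairwise_cons] at hL
    rw [List.flatMap_cons, List.pairwise_append]
    refine ⟨?_, ih hL.2, ?_⟩
    · apply List.Pairwise.imp_of_mem (l := pvBlock l1 a) (R := fun x y => x = a ∧ y = a)
      · rintro x y _ _ ⟨hx, hy⟩; rw [hx, hy]
      · exact List.pairwise_of_forall_mem_list fun x hx y hy =>
          ⟨pvBlock_mem l1 a x hx, pvBlock_mem l1 a y hy⟩
    · intro x hx y hy
      obtain ⟨d, hd, hyd⟩ := List.mem_flatMap.mp hy
      rw [pvBlock_mem l1 a x hx, pvBlock_mem l1 d y hyd]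
      exact le_of_lt (hL.1 d hd)

-- A's first loop is a filter.
theorem pvNew1_eq (l1 l2 : List Char) :
    l1.foldl (fun acc letter => if letter ∉ l2 then acc ++ [letter] else acc) []
      = l1.filter (fun c => decide (c ∉ l2)) := by
  simpa using PySem.List.foldl_append_ite_eq_filter (fun letter => letter ∉ l2) l1 []

-- Count invariant of A's second loop.
theorem pvLoop2_count (l1 : List Char) (l2 : List Char) :
    ∀ (acc : List Char) (c : Char),
    (l2.foldl (fun acc letter => if letter ∉ l1 ∧ letter ∉ acc then acc ++ [letter] else acc) acc).count c
      = acc.count c + (if c ∈ l2 ∧ c ∉ l1 ∧ c ∉ acc then 1 else 0) := by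
  induction l2 with
  | nil => intro acc c; simp
  | cons a t ih =>
    intro acc c
    rw [List.foldl_cons]
    by_cases ha : a ∉ l1 ∧ a ∉ acc
    · rw [if_pos ha, ih (acc ++ [a])]
      by_cases hc : c = a
      · subst hc
        simp [ha.1, ha.2, List.count_append]
      · have h0 : List.count c [a] = 0 := List.count_eq_zero.mpr (by simp [hc])
        simp [List.count_append, h0, hc, List.mem_append, List.mem_cons]
    · rw [if_neg ha, ih acc]
      by_cases hc : c = a
      · subst hc
        have : ¬ (c ∉ l1 ∧ c ∉ acc) := ha
        by_cases h1 : c ∉ l1 <;> by_cases h2 : c ∉ acc <;> simp_all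
      · simp [List.mem_cons, hc]

-- Count of A's accumulated string before the final sort.
theorem pvNs_count (l1 l2 : List Char) (c : Char) :
    (l2.foldl (fun acc letter => if letter ∉ l1 ∧ letter ∉ acc then acc ++ [letter] else acc)
        (l1.foldl (fun acc letter => if letter ∉ l2 then acc ++ [letter] else acc) [])).count c
      = (if c ∉ l2 then l1.count c else 0) + (if c ∈ l2 ∧ c ∉ l1 then 1 else 0) := by
  rw [pvLoop2_count, pvNew1_eq]
  have hcf : (l1.filter (fun c => decide (c ∉ l2))).count c
      = if c ∉ l2 then l1.count c else 0 := by
    by_cases h2 : c ∈ l2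
    · simp [h2, List.count_eq_zero.mpr, List.mem_filter]
    · rw [if_pos h2, List.count_filter (by simp [h2])]
  rw [hcf]
  by_cases h1 : c ∈ l1 <;> by_cases h2 : c ∈ l2
  · simp [h1, h2]
  · simp [h1, h2]
  · simp [h1, h2]
  · simp [h1, h2]

-- B's loop is the concatenation of the blocks.
theorem pvB_eq_flat (str1 : String) (s1 L : List Char) :
    L.foldl (fun acc ch =>
        if ch ∈ s1 then acc ++ List.replicate (str1.toList.count ch) ch else acc ++ [ch]) []
      = L.flatMap (fun ch => if ch ∈ s1 then List.replicate (str1.toList.count ch) ch else [ch]) := by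
  rw [PySem.List.foldl_congr_mem _ _
      (fun acc ch => acc ++ (if ch ∈ s1 then List.replicate (str1.toList.count ch) ch else [ch])) _
      (by intro acc x _; by_cases h : x ∈ s1 <;> simp [h])]
  simpa using PySem.List.foldl_append_eq_flatMap
    (fun ch => if ch ∈ s1 then List.replicate (str1.toList.count ch) ch else [ch]) L []

-- ===== VERDICT (by name: the statement is the Claim_ definition above) =====
theorem get_distinct_letters_spec : Claim_equal_get_distinct_letters := by
  intro str1 str2 _
  unfold Spec_get_distinct_letters get_distinct_letters get_distinct_letters_alt
  simp only []
  set l1 := str1.toList with hl1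
  set l2 := str2.toList with hl2
  set s1 : PySem.Set Char := PySem.Set.ofList l1 with hs1
  set s2 : PySem.Set Char := PySem.Set.ofList l2 with hs2
  set L := PySem.List.sorted (PySem.Set.symmDiff s1 s2) (fun c => c) false with hLdef
  set ns := l2.foldl (fun acc letter => if letter ∉ l1 ∧ letter ∉ acc then acc ++ [letter] else acc)
      (l1.foldl (fun acc letter => if letter ∉ l2 then acc ++ [letter] else acc) []) with hns
  rw [pvB_eq_flat str1 s1 L]
  have hBblock : (fun ch => if ch ∈ s1 then List.replicate (l1.count ch) ch else [ch]) = pvBlock l1 := by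
    funext ch
    by_cases h : ch ∈ l1 <;>
      simp [pvBlock, h, hs1, PySem.Set.mem_ofList]
  rw [hBblock]
  -- L is strictly increasing and duplicate-free
  have hLnd : L.Nodup :=
    (PySem.List.sorted_perm _ _ _).nodup_iff.mpr
      (PySem.Set.nodup_symmDiff s1 s2 (PySem.Set.nodup_ofList l1) (PySem.Set.nodup_ofList l2))
  have hLle : L.Pairwise (fun a b => a ≤ b) := by
    simpa using PySem.List.sorted_pairwise (PySem.Set.symmDiff s1 s2) (fun c : Char => c)
  have hLlt : L.Pairwise (· < ·) := by
    have := hLle.and (List.nodup_iff_pairwise_ne.mp hLnd)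
    exact this.imp (fun h => lt_of_le_of_ne h.1 h.2)
  have hmemL : ∀ c : Char, c ∈ L ↔ ((c ∈ l1 ∧ c ∉ l2) ∨ (c ∈ l2 ∧ c ∉ l1)) := by
    intro c
    rw [hLdef, PySem.List.mem_sorted, PySem.Set.mem_symmDiff, hs1, hs2,
      PySem.Set.mem_ofList, PySem.Set.mem_ofList]
  -- the two lists are permutations of each other
  have hperm : (PySem.List.sorted ns (fun c => c) false).Perm (L.flatMap (pvBlock l1)) := by
    rw [List.perm_iff_count]
    intro c
    rw [List.Perm.count_eq (PySem.List.sorted_perm ns (fun c : Char => c) false),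
      hns, pvNs_count l1 l2 c, pvFlat_count l1 L hLnd c]
    by_cases h1 : c ∈ l1 <;> by_cases h2 : c ∈ l2
    · simp [h1, h2, hmemL c]
    · simp [h1, h2, hmemL c]
    · simp [h1, h2, hmemL c]
    · simp [h1, h2, hmemL c, List.count_eq_zero.mpr h1]
  -- both lists are sorted, hence equal
  have := PySem.List.eq_of_perm_of_pairwise_le_of_injective (fun c : Char => c)
    (fun a b h => h) hperm
    (by simpa using PySem.List.sorted_pairwise ns (fun c : Char => c))
    (pvFlat_pairwise l1 L hLlt)
  rw [this]
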